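-- pv_equiv track=rewrite | github.com/IsaacG/Advent-of-Code | everybody_codes/event2024/quest_17.py | solve
-- ===== SOURCE A (Python) =====
-- import itertools
-- import math
--
-- def manhatten(a: tuple[int, int], b: tuple[int, int]) -> int:
--     """Return the Manhatten distance between two points."""
--     x1, y1 = a
--     x2, y2 = b
--     return abs(x1 - x2) + abs(y1 - y2)
--
-- def constellation_size(stars: set[tuple[int, int]]) -> int:
--     """Return the "size" of a constellation."""
--     ungrouped = stars.copy()
--     grouped = {ungrouped.pop()}
--     result = 1
--     while ungrouped:
--         distance, star = min(
--             (manhatten(a, b), a)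
--             for a, b in itertools.product(ungrouped, grouped)
--             if a != b
--         )
--         result += 1 + distance
--         grouped.add(star)
--         ungrouped.remove(star)
--     return result
--
-- def solve(part: int, data: str) -> int:
--     """Solve the parts."""
--     stars = {
--         (x, y)
--         for y, line in enumerate(data.splitlines())
--         for x, char in enumerate(line)
--         if char == "*"
--     }
--
--     if part in (1, 2):
--         return constellation_size(stars)
--
--     # Group stars into constellation where each start is within 5 of a neighbor.
--     neighbors = {
--         a: {
--             b
--             for b in stars
--             if a != b and manhatten(a, b) < 6
--         }
--         for a in stars
--     }
--
--     sizes = []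
--     while stars:
--         # Select a star then expand the group to include all nearby neighbors.
--         todo = {stars.copy().pop()}
--         constellation = set()
--         while todo:
--             cur = todo.pop()
--             stars.remove(cur)
--             constellation.add(cur)
--             todo.update(n for n in neighbors[cur] if n not in constellation)
--         # Get the constellation size.
--         sizes.append(constellation_size(constellation))
--     return math.prod(sorted(sizes, reverse=True)[:3])
-- ===== SOURCE B (Python) =====
-- import math
--
--
-- def manhatten(a, b):
--     """Return the Manhatten distance between two points."""
--     return abs(a[0] - b[0]) + abs(a[1] - b[1])
--
--
-- def constellation_size(stars):
--     """Size = star count + MST weight, via Prim with incrementally relaxed distances."""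
--     pts = list(stars)
--     dist = [(p, manhatten(p, pts[0])) for p in pts[1:]]
--     total = 1
--     while dist:
--         d, star = dist[0][1], dist[0][0]
--         for p, dp in dist[1:]:
--             if (dp, p) < (d, star):
--                 d, star = dp, p
--         total += 1 + d
--         dist = [(p, min(dp, manhatten(p, star))) for p, dp in dist if p != star]
--     return total
--
--
-- def extract_component(remaining, all_stars):
--     """Grow the component of remaining[0] under the distance<6 relation, list worklist."""
--     todo = [remaining[0]]
--     comp = []
--     while todo:
--         cur = todo.pop(0)
--         remaining.remove(cur)
--         comp.append(cur)
--         for n in all_stars: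
--             if n != cur and manhatten(cur, n) < 6 and n not in comp and n not in todo:
--                 todo.append(n)
--     return remaining, comp
--
--
-- def solve(part, data):
--     """Solve the parts."""
--     stars = []
--     for y, line in enumerate(data.splitlines()):
--         for x, ch in enumerate(line):
--             if ch == "*":
--                 stars.append((x, y))
--
--     if part in (1, 2):
--         return constellation_size(stars)
--
--     remaining = list(stars)
--     sizes = []
--     while remaining:
--         remaining, comp = extract_component(remaining, stars)
--         sizes.append(constellation_size(comp))
--     return math.prod(sorted(sizes, reverse=True)[:3])
-- ===== Notes on version B (the rewrite author's own statement) =====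
-- stated objective: faster
-- what changed: constellation_size no longer re-scans every ungrouped-x-grouped pair on each pass (A's O(n^3) loop): B runs Prim's algorithm over a list of (star, distance) pairs, selecting the best pair by one scan and relaxing the rest in the same pass (O(n^2) per constellation), and part 3 drops A's precomputed neighbor dictionary, growing each component with a plain list worklist that scans the star list on the fly.
import Mathlib
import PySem

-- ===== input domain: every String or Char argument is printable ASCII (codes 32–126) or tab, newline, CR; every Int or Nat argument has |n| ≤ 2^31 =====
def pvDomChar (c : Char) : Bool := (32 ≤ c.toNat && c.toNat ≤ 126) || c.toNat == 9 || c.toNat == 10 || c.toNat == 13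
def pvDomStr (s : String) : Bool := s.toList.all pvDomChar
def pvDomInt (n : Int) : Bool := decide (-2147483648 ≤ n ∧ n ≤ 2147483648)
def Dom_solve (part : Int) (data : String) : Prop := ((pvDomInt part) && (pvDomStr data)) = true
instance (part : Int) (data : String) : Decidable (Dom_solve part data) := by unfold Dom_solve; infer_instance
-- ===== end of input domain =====

-- B replaces A's O(n^3) minimum-spanning "constellation size" loop (min over all
-- ungrouped×grouped pairs each pass) by Prim's algorithm over a list of
-- incrementally relaxed (star, distance) pairs (O(n^2) per constellation), and part 3
-- drops A's precomputed neighbor dictionary, growing each component with a plain list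
-- worklist that scans the star list on the fly. Equivalence is about the return value
-- (neither Python mutates its arguments).

-- ===== PORT A =====

-- manhatten(a, b) (both Pythons define the identical helper)
def manh (a b : Int × Int) : Int := |a.1 - b.1| + |a.2 - b.2|

-- Python's min(...) over (distance, star) tuples: lexicographic order, first minimum kept.
-- (exact, hand-written since the key is a nested tuple)
def pstep (acc : Option (Int × (Int × Int))) (x : Int × (Int × Int)) : Option (Int × (Int × Int)) :=
  match acc with
  | none => some x
  | some c =>
    if decide (x.1 < c.1) || (x.1 == c.1 && (decide (x.2.1 < c.2.1) ||
        (x.2.1 == c.2.1 && decide (x.2.2 < c.2.2)))) then some x else some c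

def pmin (l : List (Int × (Int × Int))) : Option (Int × (Int × Int)) := l.foldl pstep none

-- `while ungrouped:` — each pass moves one star out of `ungrouped`, so |ungrouped| passes;
-- `pmin = none` happens exactly when `ungrouped` is empty (`grouped` is never empty), i.e. at
-- the Python loop exit. `ungrouped.remove(star)` is set.remove: `star` is always present here.
def csizeLoopA : Nat → List (Int × Int) → List (Int × Int) → Int → Int
  | 0, _, _, result => result
  | fuel + 1, ungrouped, grouped, result =>
    match pmin (ungrouped.flatMap fun a =>
        (grouped.filter fun b => !(a == b)).map fun b => (manh a b, a)) with
    | none => result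
    | some (d, star) =>
        csizeLoopA fuel (PySem.Set.discard ungrouped star) (PySem.Set.add grouped star)
          (result + 1 + d)

def constellation_sizeA (stars : List (Int × Int)) : Int :=
  match stars with
  | [] => 0    -- Python raises KeyError (set.pop from an empty set); outside Pre_solve, unreachable in part 3
  | s :: ungrouped => csizeLoopA ungrouped.length ungrouped [s] 1

def nbrsOf (stars : List (Int × Int)) : PySem.Dict (Int × Int) (List (Int × Int)) :=
  PySem.Dict.ofList (stars.map fun a =>
    (a, (PySem.Set.ofList (stars.filter fun b => !(a == b) && decide (manh a b < 6)) : List (Int × Int))))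

-- inner `while todo:` — each pass moves one star into the constellation, ≤ |stars| passes;
-- `stars.remove(cur)` is set.remove: `cur` is always still present here (components are
-- closed under the <6 neighbor relation, so `neighbors[cur]` never reaches an earlier group)
def bfsA : Nat → PySem.Dict (Int × Int) (List (Int × Int)) → List (Int × Int) →
    List (Int × Int) → List (Int × Int) → List (Int × Int) × List (Int × Int)
  | 0, _, _, stars, comp => (stars, comp)
  | fuel + 1, nbrs, todo, stars, comp =>
    match todo with
    | [] => (stars, comp)
    | cur :: todoRest =>
        let stars' := PySem.Set.discard stars cur
        let comp' := PySem.Set.add comp cur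
        let todo' := PySem.Set.update todoRest
          ((nbrs.getD cur []).filter fun n => !(comp'.contains n))
        bfsA fuel nbrs todo' stars' comp'

-- outer `while stars:` — each pass removes at least the seed star, so ≤ |stars| passes
def outerA : Nat → PySem.Dict (Int × Int) (List (Int × Int)) → List (Int × Int) → List Int → List Int
  | 0, _, _, sizes => sizes
  | fuel + 1, nbrs, stars, sizes =>
    match stars with
    | [] => sizes
    | s :: _ =>
        let r := bfsA stars.length nbrs [s] stars []
        outerA fuel nbrs r.1 (sizes ++ [constellation_sizeA r.2])

def solve (part : Int) (data : String) : Int :=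
  let stars : List (Int × Int) := PySem.Set.ofList
    ((PySem.List.enumerate (PySem.Str.splitlines data)).flatMap fun yl =>
      (PySem.List.enumerate yl.2.toList).flatMap fun xc =>
        if xc.2 == '*' then [(xc.1, yl.1)] else [])
  if part = 1 ∨ part = 2 then constellation_sizeA stars
  else
    let sizes := outerA stars.length (nbrsOf stars) stars []
    -- math.prod(sorted(sizes, reverse=True)[:3]); the slice [:3] of a list is `take 3`
    ((PySem.List.sorted sizes (fun x => x) true).take 3).foldl (· * ·) 1

-- ===== PORT B =====

-- `(dp, p) < (d, star)` on Python tuples: strict lexicographic comparison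
def min2 (c x : Int × (Int × Int)) : Int × (Int × Int) :=
  if decide (x.1 < c.1) || (x.1 == c.1 && (decide (x.2.1 < c.2.1) ||
      (x.2.1 == c.2.1 && decide (x.2.2 < c.2.2)))) then x else c

-- `[(p, min(dp, manhatten(p, star))) for p, dp in dist if p != star]`: one pass that
-- drops the chosen star and relaxes every remaining distance
def relax : List ((Int × Int) × Int) → (Int × Int) → List ((Int × Int) × Int)
  | [], _ => []
  | pd :: t, star =>
      if pd.1 == star then relax t star
      else (pd.1, min pd.2 (manh pd.1 star)) :: relax t star

-- Prim's loop: `dist` pairs each unreached star with its distance to the reached set;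
-- the `for p, dp in dist[1:]` scan keeps the first lexicographic minimum, seeded at dist[0]
def csizeLoopB : Nat → List ((Int × Int) × Int) → Int → Int
  | 0, _, total => total
  | _ + 1, [], total => total
  | fuel + 1, pd0 :: rest, total =>
      let best := rest.foldl (fun c pd => min2 c (pd.2, pd.1)) (pd0.2, pd0.1)
      csizeLoopB fuel (relax (pd0 :: rest) best.2) (total + 1 + best.1)

def constellation_sizeB (stars : List (Int × Int)) : Int :=
  match stars with
  | [] => 1    -- Python: dist starts empty, the while loop never runs, total = 1 (A raises here; outside Pre_solve, unreachable in part 3)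
  | s :: rest => csizeLoopB rest.length (rest.map fun p => (p, manh p s)) 1

-- extract_component: `remaining.remove(cur)` is list.remove (first occurrence) = List.erase;
-- `cur` is always present here; returns (remaining', comp)
def bfsB : Nat → List (Int × Int) → List (Int × Int) → List (Int × Int) → List (Int × Int) →
    List (Int × Int) × List (Int × Int)
  | 0, _, _, remaining, comp => (remaining, comp)
  | fuel + 1, allStars, todo, remaining, comp =>
    match todo with
    | [] => (remaining, comp)
    | cur :: todoRest =>
        let remaining' := remaining.erase cur
        let comp' := comp ++ [cur]
        let todo' := allStars.foldl (fun td n =>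
          if !(n == cur) && decide (manh cur n < 6) && !(comp'.contains n) && !(td.contains n)
          then td ++ [n] else td) todoRest
        bfsB fuel allStars todo' remaining' comp'

def outerB : Nat → List (Int × Int) → List (Int × Int) → List Int → List Int
  | 0, _, _, sizes => sizes
  | fuel + 1, allStars, remaining, sizes =>
    match remaining with
    | [] => sizes
    | s :: _ =>
        let r := bfsB remaining.length allStars [s] remaining []
        outerB fuel allStars r.1 (sizes ++ [constellation_sizeB r.2])

def solve_alt (part : Int) (data : String) : Int :=
  let stars : List (Int × Int) :=
    (PySem.List.enumerate (PySem.Str.splitlines data)).foldl (fun acc yl =>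
      (PySem.List.enumerate yl.2.toList).foldl (fun acc2 xc =>
        if xc.2 == '*' then acc2 ++ [(xc.1, yl.1)] else acc2) acc) []
  if part = 1 ∨ part = 2 then constellation_sizeB stars
  else
    let sizes := outerB stars.length stars stars []
    -- math.prod is the product of the list
    ((PySem.List.sorted sizes (fun x => x) true).take 3).prod

-- ===== PRECONDITION & SPEC =====

-- Pre_ excludes only parts 1/2 of an input with no '*' anywhere: there A raises KeyError
-- (set.pop from an empty set) while B's while loop simply never runs.
def Pre_solve (part : Int) (data : String) : Prop :=
  (part = 1 ∨ part = 2) → ∃ line ∈ PySem.Str.splitlines data, '*' ∈ line.toList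
instance (part : Int) (data : String) : Decidable (Pre_solve part data) := by
  unfold Pre_solve; infer_instance

def pvWitness_solve : Int × String := (1, "*.*\n.*.")

def Spec_solve (part : Int) (data : String) (out : Int) : Prop := out = solve_alt part data
instance (part : Int) (data : String) (out : Int) : Decidable (Spec_solve part data out) := by
  unfold Spec_solve; infer_instance

-- ===== CLAIM (what is proved, stated in full; the proofs are below) =====
def Claim_equal_solve : Prop := ∀ (part : Int) (data : String),
  Dom_solve part data → Pre_solve part data → Spec_solve part data (solve part data)

-- ===== LEMMAS AND PROOFS =====

-- minimum distance from p to the (nonempty) reached set g, written as A's Python computes it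
def gmin : List (Int × Int) → (Int × Int) → Int
  | [], _ => 0
  | b :: bt, p => bt.foldl (fun m b' => min m (manh p b')) (manh p b)

theorem pstep_pstep (acc : Option (Int × (Int × Int))) (m d : Int) (a : Int × Int) :
    pstep (pstep acc (m, a)) (d, a) = pstep acc (min m d, a) := by
  obtain ⟨a1, a2⟩ := a
  cases acc with
  | none =>
    simp only [pstep, min_def]
    split_ifs <;> simp_all <;> omega
  | some c =>
    obtain ⟨c1, c2, c3⟩ := c
    simp only [pstep, min_def]
    split_ifs <;> simp_all <;> omega

theorem foldl_pstep_const_snd (a : Int × Int) :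
    ∀ (ds : List Int) (acc : Option (Int × (Int × Int))) (m : Int),
    (ds.map fun d => (d, a)).foldl pstep (pstep acc (m, a)) = pstep acc (ds.foldl min m, a) := by
  intro ds
  induction ds with
  | nil => intro acc m; rfl
  | cons d ds ih =>
    intro acc m
    rw [List.map_cons, List.foldl_cons, pstep_pstep, List.foldl_cons]
    exact ih acc (min m d)

theorem gmin_append_single (g : List (Int × Int)) (hg : g ≠ []) (b p : Int × Int) :
    gmin (g ++ [b]) p = min (gmin g p) (manh p b) := by
  cases g with
  | nil => exact absurd rfl hg
  | cons b0 bt => simp [gmin, List.foldl_append]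

theorem selection (grouped : List (Int × Int)) (hg : grouped ≠ []) :
    ∀ (ung : List (Int × Int)) (acc : Option (Int × (Int × Int))),
    (∀ a ∈ ung, a ∉ grouped) →
    (ung.flatMap fun a =>
        (grouped.filter fun b => !(a == b)).map fun b => (manh a b, a)).foldl pstep acc
      = (ung.map fun a => (gmin grouped a, a)).foldl pstep acc := by
  intro ung
  induction ung with
  | nil => intro acc _; rfl
  | cons a ung ih =>
    intro acc hdis
    have hne : ∀ b ∈ grouped, (!(a == b)) = true := by
      intro b hb
      simp only [Bool.not_eq_eq_eq_not, Bool.not_true, beq_eq_false_iff_ne]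
      exact fun h => (hdis a (by simp)) (h ▸ hb)
    rw [List.flatMap_cons, List.foldl_append, List.filter_eq_self.mpr hne,
        List.map_cons, List.foldl_cons]
    cases grouped with
    | nil => exact absurd rfl hg
    | cons g0 gt =>
      have hblock : ((g0 :: gt).map fun b => (manh a b, a)).foldl pstep acc
          = pstep acc (gmin (g0 :: gt) a, a) := by
        rw [List.map_cons, List.foldl_cons]
        have h2 := foldl_pstep_const_snd a (gt.map fun b => manh a b) acc (manh a g0)
        simp only [List.map_map, Function.comp_def] at h2
        rw [h2]
        simp [gmin, List.foldl_map]
      rw [hblock]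
      exact ih (pstep acc (gmin (g0 :: gt) a, a)) (fun x hx => hdis x (by simp [hx]))

theorem pstep_some (c x : Int × (Int × Int)) : pstep (some c) x = some (min2 c x) := by
  simp only [pstep, min2]
  split <;> rfl

theorem foldl_pstep_some (l : List (Int × (Int × Int))) :
    ∀ (c : Int × (Int × Int)), l.foldl pstep (some c) = some (l.foldl min2 c) := by
  induction l with
  | nil => intro c; rfl
  | cons x l ih => intro c; rw [List.foldl_cons, pstep_some, List.foldl_cons]; exact ih _

theorem min2_cases (c x : Int × (Int × Int)) : min2 c x = c ∨ min2 c x = x := by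
  simp only [min2]; split <;> simp

theorem foldl_min2_mem (l : List (Int × (Int × Int))) :
    ∀ (c : Int × (Int × Int)), l.foldl min2 c = c ∨ l.foldl min2 c ∈ l := by
  induction l with
  | nil => intro c; exact Or.inl rfl
  | cons x l ih =>
    intro c
    rw [List.foldl_cons]
    rcases ih (min2 c x) with h | h
    · rcases min2_cases c x with h' | h'
      · left; rw [h, h']
      · right; rw [h, h']; simp
    · right; exact List.mem_cons_of_mem _ h

theorem relax_map (grouped : List (Int × Int)) (hg : grouped ≠ []) (star : Int × Int) :
    ∀ (ung : List (Int × Int)),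
    relax (ung.map fun p => (p, gmin grouped p)) star
      = (ung.filter fun p => !(p == star)).map fun p => (p, gmin (grouped ++ [star]) p) := by
  intro ung
  induction ung with
  | nil => rfl
  | cons p t ih =>
    rw [List.map_cons]
    by_cases h : p = star
    · rw [relax, if_pos (by simpa using h), List.filter_cons_of_neg (by simp [h])]
      exact ih
    · rw [relax, if_neg (by simpa using h), List.filter_cons_of_pos (by simp [h]),
          List.map_cons, ih, gmin_append_single grouped hg star p]

theorem csizeLoop_eq (fuel : Nat) :
    ∀ (ung grouped : List (Int × Int)) (res : Int), grouped ≠ [] → ung.Nodup →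
    (∀ a ∈ ung, a ∉ grouped) →
    csizeLoopA fuel ung grouped res = csizeLoopB fuel (ung.map fun p => (p, gmin grouped p)) res := by
  induction fuel with
  | zero => intro _ _ _ _ _ _; rfl
  | succ fuel ih =>
    intro ung grouped res hg hnd hdis
    have hsel := selection grouped hg ung none hdis
    cases ung with
    | nil => simp [csizeLoopA, csizeLoopB, pmin]
    | cons a ungt =>
      -- the minimum both sides compute
      have hA : pmin ((a :: ungt).flatMap fun x =>
            (grouped.filter fun b => !(x == b)).map fun b => (manh x b, x))
          = some ((ungt.map fun p => (gmin grouped p, p)).foldl min2 (gmin grouped a, a)) := by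
        unfold pmin
        rw [hsel, List.map_cons, List.foldl_cons]
        show (ungt.map fun p => (gmin grouped p, p)).foldl pstep (some (gmin grouped a, a)) = _
        exact foldl_pstep_some _ _
      set best := (ungt.map fun p => (gmin grouped p, p)).foldl min2 (gmin grouped a, a) with hbest
      have hfold : (ungt.map fun p => (p, gmin grouped p)).foldl
            (fun c pd => min2 c (pd.2, pd.1)) (gmin grouped a, a) = best := by
        rw [hbest, List.foldl_map, List.foldl_map]
      -- best = (gmin grouped star, star) for some star ∈ a :: ungt
      have hmem : ∃ star ∈ a :: ungt, best = (gmin grouped star, star) := by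
        rcases foldl_min2_mem _ (gmin grouped a, a) with h | h
        · exact ⟨a, by simp, h⟩
        · obtain ⟨p, hp, hEq⟩ := List.mem_map.mp h
          exact ⟨p, List.mem_cons_of_mem _ hp, hEq.symm⟩
      obtain ⟨star, hstar, hbe⟩ := hmem
      have hBred : csizeLoopB (fuel + 1) ((a :: ungt).map fun p => (p, gmin grouped p)) res
          = csizeLoopB fuel (relax ((a :: ungt).map fun p => (p, gmin grouped p)) best.2)
              (res + 1 + best.1) := by
        rw [List.map_cons]
        simp only [csizeLoopB]
        rw [hfold]
      simp only [csizeLoopA, hA]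
      rw [hBred, hbe]
      have hrelax : relax ((a :: ungt).map fun p => (p, gmin grouped p)) star
          = ((a :: ungt).filter fun p => !(p == star)).map
              fun p => (p, gmin (grouped ++ [star]) p) :=
        relax_map grouped hg star (a :: ungt)
      show csizeLoopA fuel (PySem.Set.discard (a :: ungt) star) (PySem.Set.add grouped star)
            (res + 1 + gmin grouped star)
          = csizeLoopB fuel (relax ((a :: ungt).map fun p => (p, gmin grouped p)) star)
            (res + 1 + gmin grouped star)
      have hng : star ∉ grouped := hdis star hstar
      have hadd : PySem.Set.add grouped star = grouped ++ [star] := by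
        simp [PySem.Set.add, hng]
      have hdiscard : PySem.Set.discard (a :: ungt) star
          = (a :: ungt).filter (fun p => !(p == star)) := rfl
      rw [hadd, hdiscard, hrelax]
      refine ih _ _ _ (by simp) (hnd.filter _) ?_
      intro p hp
      have hp' := List.mem_filter.mp hp
      have hpa : p ≠ star := by simpa using hp'.2
      simp only [List.mem_append, List.mem_singleton]
      rintro (hingrp | rfl)
      · exact hdis p hp'.1 hingrp
      · exact hpa rfl

theorem csize_eq (L : List (Int × Int)) (h : L.Nodup) (hne : L ≠ []) :
    constellation_sizeA L = constellation_sizeB L := by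
  cases L with
  | nil => exact absurd rfl hne
  | cons s rest =>
    have hd := List.nodup_cons.mp h
    have := csizeLoop_eq rest.length rest [s] 1 (by simp) hd.2
      (fun a ha => by
        simp only [List.mem_singleton]
        exact fun he => hd.1 (he ▸ ha))
    simpa [constellation_sizeA, constellation_sizeB, gmin] using this

theorem getD_ofList_map (f : (Int × Int) → List (Int × Int)) :
    ∀ (l : List (Int × Int)) (cur : Int × Int), cur ∈ l →
    (PySem.Dict.ofList (l.map fun a => (a, f a))).getD cur [] = f cur := by
  intro l
  induction l using List.reverseRecOn with
  | nil => intro cur h; simp at h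
  | append_singleton xs x ih =>
    intro cur hcur
    have hstep : PySem.Dict.ofList ((xs ++ [x]).map fun a => (a, f a))
        = (PySem.Dict.ofList (xs.map fun a => (a, f a))).insert x (f x) := by
      simp [PySem.Dict.ofList, PySem.Dict.update, List.foldl_append]
    rw [hstep, PySem.Dict.getD_insert]
    rcases List.mem_append.mp hcur with h | h
    · by_cases he : cur = x
      · simp [he]
      · simp [he, ih cur h]
    · simp at h
      simp [h]

theorem getD_nbrs (stars0 : List (Int × Int)) (cur : Int × Int) (hc : cur ∈ stars0)
    (hnd : stars0.Nodup) :
    (nbrsOf stars0).getD cur []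
      = stars0.filter fun b => !(cur == b) && decide (manh cur b < 6) := by
  unfold nbrsOf
  rw [getD_ofList_map _ stars0 cur hc]
  exact PySem.Set.ofList_eq_self_of_nodup _ (hnd.filter _)

-- A's `todo.update(n for n in neighbors[cur] if n not in constellation)` (a fold of Set.add over
-- a twice-filtered list) equals B's single fold over all stars with the conjoined guard
theorem fold_add_filter' (comp' : List (Int × Int)) (cur : Int × Int) :
    ∀ (l : List (Int × Int)) (td : List (Int × Int)),
    (((l.filter fun b => !(cur == b) && decide (manh cur b < 6)).filter fun n =>
        !(PySem.Set.contains comp' n)).foldl PySem.Set.add td)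
      = l.foldl (fun td n =>
          if !(n == cur) && decide (manh cur n < 6) && !(comp'.contains n) && !(td.contains n)
          then td ++ [n] else td) td := by
  intro l
  induction l with
  | nil => intro td; rfl
  | cons x l ih =>
    intro td
    rw [List.foldl_cons]
    by_cases h1 : cur = x
    · have hinit : (if (!(x == cur) && decide (manh cur x < 6) && !(comp'.contains x)
            && !(td.contains x)) = true then td ++ [x] else td) = td := by
        simp [h1.symm]
      rw [List.filter_cons_of_neg (by simp [h1]), hinit]
      exact ih td
    · by_cases h2 : manh cur x < 6
      · rw [List.filter_cons_of_pos (by simp [h1, h2])]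
        by_cases h3 : x ∈ comp'
        · have hinit : (if (!(x == cur) && decide (manh cur x < 6) && !(comp'.contains x)
              && !(td.contains x)) = true then td ++ [x] else td) = td := by
            simp [h3]
          rw [List.filter_cons_of_neg (by simp [PySem.Set.contains, h3]), hinit]
          exact ih td
        · rw [List.filter_cons_of_pos (by simp [PySem.Set.contains, h3]), List.foldl_cons]
          by_cases h4 : x ∈ td
          · have hadd : PySem.Set.add td x = td := by simp [PySem.Set.add, h4]
            have hinit : (if (!(x == cur) && decide (manh cur x < 6) && !(comp'.contains x)
                && !(td.contains x)) = true then td ++ [x] else td) = td := by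
              simp [h4]
            rw [hadd, hinit]
            exact ih td
          · have hadd : PySem.Set.add td x = td ++ [x] := by simp [PySem.Set.add, h4]
            have hinit : (if (!(x == cur) && decide (manh cur x < 6) && !(comp'.contains x)
                && !(td.contains x)) = true then td ++ [x] else td) = td ++ [x] := by
              simp [Ne.symm h1, h2, h3, h4]
            rw [hadd, hinit]
            exact ih (td ++ [x])
      · have hinit : (if (!(x == cur) && decide (manh cur x < 6) && !(comp'.contains x)
            && !(td.contains x)) = true then td ++ [x] else td) = td := by
          simp [h2]
        rw [List.filter_cons_of_neg (by simp [h1, h2]), hinit]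
        exact ih td

theorem nodup_append_single {l : List (Int × Int)} {x : Int × Int}
    (h : l.Nodup) (hx : x ∉ l) : (l ++ [x]).Nodup := by
  rw [List.nodup_append]
  refine ⟨h, List.nodup_singleton x, ?_⟩
  intro a ha b hb
  simp only [List.mem_singleton] at hb
  subst hb
  exact fun he => hx (he ▸ ha)

theorem bfs_eq (stars0 : List (Int × Int)) (hnd : stars0.Nodup) (fuel : Nat) :
    ∀ (todo stars comp : List (Int × Int)),
    (∀ t ∈ todo, t ∈ stars0) → todo.Nodup → (∀ t ∈ todo, t ∉ comp) → stars.Nodup →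
    bfsA fuel (nbrsOf stars0) todo stars comp = bfsB fuel stars0 todo stars comp := by
  induction fuel with
  | zero => intros; rfl
  | succ fuel ih =>
    intro todo stars comp hsub hndt hdisc hnds
    cases todo with
    | nil => rfl
    | cons cur todoRest =>
      have hcur0 : cur ∈ stars0 := hsub cur (by simp)
      have hcnd := List.nodup_cons.mp hndt
      have hnc : cur ∉ comp := hdisc cur (by simp)
      have hcomp' : PySem.Set.add comp cur = comp ++ [cur] := by
        simp [PySem.Set.add, hnc]
      have hstars' : PySem.Set.discard stars cur = stars.erase cur := by
        rw [List.Nodup.erase_eq_filter hnds]; rfl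
      have htodo' : PySem.Set.update todoRest
            (((nbrsOf stars0).getD cur []).filter fun n =>
              !((PySem.Set.add comp cur).contains n))
          = stars0.foldl (fun td n =>
              if !(n == cur) && decide (manh cur n < 6) && !((comp ++ [cur]).contains n)
                  && !(td.contains n)
              then td ++ [n] else td) todoRest := by
        rw [getD_nbrs stars0 cur hcur0 hnd, hcomp']
        exact fold_add_filter' (comp ++ [cur]) cur stars0 todoRest
      simp only [bfsA, bfsB]
      rw [htodo', hcomp', hstars']
      apply ih
      · intro t ht
        rw [← htodo'] at ht
        rcases (PySem.Set.mem_update _ _ _).mp ht with h | h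
        · exact hsub t (by simp [h])
        · rw [getD_nbrs stars0 cur hcur0 hnd] at h
          exact List.mem_of_mem_filter (List.mem_of_mem_filter h)
      · rw [← htodo']
        exact PySem.Set.nodup_update _ _ hcnd.2
      · intro t ht
        rw [← htodo'] at ht
        rcases (PySem.Set.mem_update _ _ _).mp ht with h | h
        · have h5 : t ∉ comp := hdisc t (by simp [h])
          have h6 : t ≠ cur := fun he => hcnd.1 (he ▸ h)
          simp [h5, h6]
        · have h7 := (List.mem_filter.mp h).2
          rw [hcomp'] at h7
          simpa [PySem.Set.contains] using h7
      · exact hnds.erase cur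

theorem mem_foldB (cur : Int × Int) (comp' : List (Int × Int)) (l : List (Int × Int)) :
    ∀ (td : List (Int × Int)) (t : Int × Int),
    t ∈ l.foldl (fun td n =>
        if !(n == cur) && decide (manh cur n < 6) && !(comp'.contains n) && !(td.contains n)
        then td ++ [n] else td) td → t ∈ td ∨ t ∉ comp' := by
  induction l with
  | nil => intro td t h; exact Or.inl h
  | cons x l ih =>
    intro td t h
    rw [List.foldl_cons] at h
    rcases ih _ t h with h' | h'
    · split at h'
      · rcases List.mem_append.mp h' with h'' | h''
        · exact Or.inl h''
        · simp only [List.mem_singleton] at h''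
          subst h''
          rename_i hg
          simp only [Bool.and_eq_true] at hg
          right
          simpa using hg.1.2
      · exact Or.inl h'
    · exact Or.inr h'

theorem nodup_foldB (cur : Int × Int) (comp' : List (Int × Int)) (l : List (Int × Int)) :
    ∀ (td : List (Int × Int)), td.Nodup →
    (l.foldl (fun td n =>
        if !(n == cur) && decide (manh cur n < 6) && !(comp'.contains n) && !(td.contains n)
        then td ++ [n] else td) td).Nodup := by
  induction l with
  | nil => intro td h; exact h
  | cons x l ih =>
    intro td h
    rw [List.foldl_cons]
    apply ih
    dsimp only
    split
    · rename_i hg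
      simp only [Bool.and_eq_true] at hg
      exact nodup_append_single h (by simpa using hg.2)
    · exact h

theorem bfsB_comp_prefix (stars0 : List (Int × Int)) (fuel : Nat) :
    ∀ (todo remaining comp : List (Int × Int)),
    comp <+: (bfsB fuel stars0 todo remaining comp).2 := by
  induction fuel with
  | zero => intro _ _ _; exact List.prefix_refl _
  | succ fuel ih =>
    intro todo remaining comp
    cases todo with
    | nil => exact List.prefix_refl _
    | cons cur todoRest =>
      simp only [bfsB]
      exact (List.prefix_append comp [cur]).trans (ih _ _ _)

theorem bfsB_comp_ne (stars0 : List (Int × Int)) (fuel : Nat)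
    (todo remaining comp : List (Int × Int)) (hc : comp ≠ []) :
    (bfsB fuel stars0 todo remaining comp).2 ≠ [] := fun he =>
  hc (List.prefix_nil.mp (he ▸ bfsB_comp_prefix stars0 fuel todo remaining comp))

theorem bfsB_post (stars0 : List (Int × Int)) (fuel : Nat) :
    ∀ (todo remaining comp : List (Int × Int)),
    todo.Nodup → (∀ t ∈ todo, t ∉ comp) → comp.Nodup →
    (bfsB fuel stars0 todo remaining comp).1.Sublist remaining ∧
      (bfsB fuel stars0 todo remaining comp).2.Nodup := by
  induction fuel with
  | zero => intro todo remaining comp _ _ hc; exact ⟨List.Sublist.refl _, hc⟩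
  | succ fuel ih =>
    intro todo remaining comp hndt hdisc hndc
    cases todo with
    | nil => exact ⟨List.Sublist.refl _, hndc⟩
    | cons cur todoRest =>
      simp only [bfsB]
      have hcnd := List.nodup_cons.mp hndt
      have hcc : cur ∉ comp := hdisc cur (by simp)
      have hih := ih _ (remaining.erase cur) (comp ++ [cur])
        (nodup_foldB cur (comp ++ [cur]) stars0 todoRest hcnd.2)
        (by
          intro t ht
          rcases mem_foldB cur (comp ++ [cur]) stars0 todoRest t ht with h | h
          · have h5 : t ∉ comp := hdisc t (by simp [h])
            have h6 : t ≠ cur := fun he => hcnd.1 (he ▸ h)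
            simp [h5, h6]
          · exact h)
        (nodup_append_single hndc hcc)
      exact ⟨hih.1.trans (List.erase_sublist), hih.2⟩

theorem outer_eq (stars0 : List (Int × Int)) (hnd : stars0.Nodup) (fuel : Nat) :
    ∀ (remaining : List (Int × Int)) (sizes : List Int), remaining.Sublist stars0 →
    outerA fuel (nbrsOf stars0) remaining sizes = outerB fuel stars0 remaining sizes := by
  induction fuel with
  | zero => intros; rfl
  | succ fuel ih =>
    intro remaining sizes hsub
    cases remaining with
    | nil => rfl
    | cons s rest =>
      simp only [outerA, outerB]
      have hnd_rem : (s :: rest).Nodup := hsub.nodup hnd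
      have hbfs := bfs_eq stars0 hnd (s :: rest).length [s] (s :: rest) []
        (by intro t ht; simp only [List.mem_singleton] at ht; subst ht
            exact hsub.subset (by simp))
        (by simp) (by simp) hnd_rem
      rw [hbfs]
      have hpost := bfsB_post stars0 (s :: rest).length [s] (s :: rest) []
        (by simp) (by simp) (by simp)
      have hcne : (bfsB (s :: rest).length stars0 [s] (s :: rest) []).2 ≠ [] := by
        rw [List.length_cons]
        simp only [bfsB]
        exact bfsB_comp_ne stars0 rest.length _ _ _ (by simp)
      rw [csize_eq _ hpost.2 hcne]
      exact ih _ _ (hpost.1.trans hsub)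

-- the star list both Pythons extract, in reading order
def parseL (data : String) : List (Int × Int) :=
  (PySem.List.enumerate (PySem.Str.splitlines data)).flatMap fun yl =>
    (PySem.List.enumerate yl.2.toList).flatMap fun xc =>
      if xc.2 == '*' then [(xc.1, yl.1)] else []

theorem mem_cell {z : Int × Int} {c : Char} {x y : Int}
    (h : z ∈ if c == '*' then [(x, y)] else []) : z = (x, y) := by
  split at h <;> simp_all

theorem parse_nodup (data : String) : (parseL data).Nodup := by
  unfold parseL
  rw [List.nodup_flatMap]
  constructor
  · intro yl _
    rw [List.nodup_flatMap]
    constructor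
    · intro xc _; split <;> simp
    · refine (PySem.List.pairwise_lt_enumerate _ _).imp ?_
      intro p q hpq z hz1 hz2
      have e1 := mem_cell hz1
      have e2 := mem_cell hz2
      rw [e1] at e2
      injection e2 with e3 _
      omega
  · refine (PySem.List.pairwise_lt_enumerate _ _).imp ?_
    intro p q hpq z hz1 hz2
    obtain ⟨xc, _, hc⟩ := List.mem_flatMap.mp hz1
    obtain ⟨xd, _, hd⟩ := List.mem_flatMap.mp hz2
    have e1 := mem_cell hc
    have e2 := mem_cell hd
    rw [e1] at e2
    injection e2 with _ e3
    omega

theorem parseA_eq (data : String) :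
    PySem.Set.ofList
      ((PySem.List.enumerate (PySem.Str.splitlines data)).flatMap fun yl =>
        (PySem.List.enumerate yl.2.toList).flatMap fun xc =>
          if xc.2 == '*' then [(xc.1, yl.1)] else [])
      = parseL data :=
  PySem.Set.ofList_eq_self_of_nodup _ (parse_nodup data)

theorem flatMap_if_singleton {α β : Type} (p : α → Bool) (f : α → β) :
    ∀ l : List α, (l.flatMap fun x => if p x then [f x] else []) = (l.filter p).map f := by
  intro l
  induction l with
  | nil => rfl
  | cons x l ih => by_cases h : p x = true <;> simp [h, ih]

theorem parseB_eq (data : String) :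
    ((PySem.List.enumerate (PySem.Str.splitlines data)).foldl (fun acc yl =>
      (PySem.List.enumerate yl.2.toList).foldl (fun acc2 xc =>
        if xc.2 == '*' then acc2 ++ [(xc.1, yl.1)] else acc2) acc) [])
      = parseL data := by
  have h1 : (fun (acc : List (Int × Int)) (yl : Int × String) =>
        (PySem.List.enumerate yl.2.toList).foldl (fun acc2 xc =>
          if xc.2 == '*' then acc2 ++ [(xc.1, yl.1)] else acc2) acc)
      = fun acc yl => acc ++ ((PySem.List.enumerate yl.2.toList).flatMap fun xc =>
          if xc.2 == '*' then [(xc.1, yl.1)] else []) := by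
    funext acc yl
    rw [PySem.List.foldl_append_if (fun xc : Int × Char => xc.2 == '*')
          (fun xc : Int × Char => (xc.1, yl.1)),
        flatMap_if_singleton]
  rw [h1, PySem.List.foldl_append_eq_flatMap, List.nil_append]
  rfl

theorem parse_ne (data : String)
    (h : ∃ line ∈ PySem.Str.splitlines data, '*' ∈ line.toList) : parseL data ≠ [] := by
  obtain ⟨line, hl, hstar⟩ := h
  obtain ⟨k, hk, hline⟩ := List.mem_iff_getElem.mp hl
  obtain ⟨j, hj, hch⟩ := List.mem_iff_getElem.mp hstar
  apply List.ne_nil_of_mem (a := ((j : Int), (k : Int)))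
  unfold parseL
  refine List.mem_flatMap.mpr ⟨((k : Int), line), ?_, ?_⟩
  · exact (PySem.List.mem_enumerate_iff _ _ _).mpr ⟨k, hk, by simp [hline]⟩
  · refine List.mem_flatMap.mpr ⟨((j : Int), '*'), ?_, ?_⟩
    · exact (PySem.List.mem_enumerate_iff _ _ _).mpr ⟨j, hj, by simp [hch]⟩
    · simp

-- ===== VERDICT (by name: the statement is the Claim_ definition above) =====
theorem solve_spec : Claim_equal_solve := by
  intro part data _ hpre
  show solve part data = solve_alt part data
  unfold solve solve_alt
  rw [parseA_eq, parseB_eq]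
  by_cases hp : part = 1 ∨ part = 2
  · simp only [if_pos hp]
    exact csize_eq _ (parse_nodup data) (parse_ne data (hpre hp))
  · simp only [if_neg hp]
    rw [outer_eq (parseL data) (parse_nodup data) (parseL data).length (parseL data) []
      (List.Sublist.refl _), List.prod_eq_foldl]
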